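-- pv_equiv track=rewrite | github.com/noaione/potia-muse | cogs/youtube.py | _truncate_fields
-- ===== SOURCE A (Python) =====
-- def _truncate_fields(dataset: list, limit: int = 1024):
--     final_text = ""
--     for data in dataset:
--         add_text = data + "\n"
--         length_now = len(final_text) + len(add_text)
--         if length_now >= limit:
--             break
--         final_text += add_text
--     return final_text
-- ===== SOURCE B (Python) =====
-- def _truncate_fields(dataset: list, limit: int = 1024):
--     # Phase 1: cumulative lengths of each data + "\n".
--     cum = []
--     total = 0
--     for data in dataset:
--         total += len(data) + 1
--         cum.append(total)
--     # Phase 2: first index whose cumulative total reaches the limit is the cutoff.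
--     k = next((i for i, c in enumerate(cum) if c >= limit), len(dataset))
--     # Build the result once.
--     return "".join(data + "\n" for data in dataset[:k])
-- ===== Notes on version B (the rewrite author's own statement) =====
-- stated objective: idiomatic
-- what changed: Replaces the incremental accumulate-and-break string building with a two-phase shape: compute cumulative lengths once, find the first index that reaches the limit, then build the result with a single ''.join over the prefix.
import Mathlib
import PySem

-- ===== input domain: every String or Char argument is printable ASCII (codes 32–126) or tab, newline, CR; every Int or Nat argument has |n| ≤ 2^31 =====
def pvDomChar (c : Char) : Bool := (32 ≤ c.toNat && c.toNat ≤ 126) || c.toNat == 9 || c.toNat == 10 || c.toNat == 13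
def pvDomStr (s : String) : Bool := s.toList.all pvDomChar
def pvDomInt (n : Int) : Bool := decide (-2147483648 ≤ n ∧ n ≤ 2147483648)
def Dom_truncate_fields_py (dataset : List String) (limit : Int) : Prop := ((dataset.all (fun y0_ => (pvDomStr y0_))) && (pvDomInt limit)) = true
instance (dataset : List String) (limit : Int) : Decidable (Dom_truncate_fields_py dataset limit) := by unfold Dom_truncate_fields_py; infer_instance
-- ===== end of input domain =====

-- B replaces A's accumulate-and-break string building with a two-phase "cumulative lengths,
-- find the cutoff, then join once" decomposition (idiomatic; same asymptotic cost).


-- ===== PORT A =====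
-- the for-loop with its `break`, as structural recursion over the remaining dataset,
-- carrying the accumulator final_text
def truncAuxA (limit : Int) : List String → String → String
  | [], final_text => final_text
  | data :: rest, final_text =>
    let add_text := data ++ "\n"
    let length_now : Int := PySem.Str.len final_text + PySem.Str.len add_text
    if length_now ≥ limit then final_text
    else truncAuxA limit rest (final_text ++ add_text)

def truncate_fields_py (dataset : List String) (limit : Int) : String :=
  truncAuxA limit dataset ""

-- ===== PORT B =====
-- Phase 1 of Source B: the loop appending the running total `total + len(data) + 1`,
-- as structural recursion carrying `total` (same values, same order)
def cumTotals (total : Int) : List String → List Int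
  | [] => []
  | data :: rest =>
    let t := total + (PySem.Str.len data + 1)
    t :: cumTotals t rest

def truncate_fields_py_alt (dataset : List String) (limit : Int) : String :=
  let cum := cumTotals 0 dataset
  -- next((i for i, c in enumerate(cum) if c >= limit), len(dataset))
  let k := (cum.findIdx? (fun c => limit ≤ c)).getD dataset.length
  PySem.Str.join "" ((dataset.take k).map (fun data => data ++ "\n"))

-- ===== PRECONDITION & SPEC =====
def Spec_truncate_fields_py (dataset : List String) (limit : Int) (out : String) : Prop := out = truncate_fields_py_alt dataset limit
instance (dataset : List String) (limit : Int) (out : String) : Decidable (Spec_truncate_fields_py dataset limit out) := by unfold Spec_truncate_fields_py; infer_instance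

-- ===== CLAIM (what is proved, stated in full; the proofs are below) =====
def Claim_equal_truncate_fields_py : Prop := ∀ (dataset : List String) (limit : Int), Dom_truncate_fields_py dataset limit → Spec_truncate_fields_py dataset limit (truncate_fields_py dataset limit)

-- ===== LEMMAS AND PROOFS =====

-- a common recursive characterisation both ports are reduced to
def modelT : List String → Int → String
  | [], _ => ""
  | d :: rest, m =>
    if m ≤ PySem.Str.len d + 1 then ""
    else (d ++ "\n") ++ modelT rest (m - (PySem.Str.len d + 1))

theorem truncAuxA_eq (ds : List String) : ∀ (limit : Int) (final : String),
    truncAuxA limit ds final = final ++ modelT ds (limit - PySem.Str.len final) := by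
  induction ds with
  | nil => intro limit final; simp [truncAuxA, modelT]
  | cons d rest ih =>
    intro limit final
    have hadd : (PySem.Str.len (d ++ "\n") : Int) = (PySem.Str.len d : Int) + 1 := by
      simp [PySem.Str.len]
    by_cases h : limit ≤ (PySem.Str.len final : Int) + PySem.Str.len (d ++ "\n")
    · have h' : limit - (PySem.Str.len final : Int) ≤ (PySem.Str.len d : Int) + 1 := by
        rw [hadd] at h; omega
      simp only [truncAuxA, modelT, ge_iff_le]
      rw [if_pos h, if_pos h']
      simp
    · have h' : ¬ (limit - (PySem.Str.len final : Int) ≤ (PySem.Str.len d : Int) + 1) := by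
        rw [hadd] at h; omega
      have hl : (PySem.Str.len (final ++ (d ++ "\n")) : Int) =
          (PySem.Str.len final : Int) + ((PySem.Str.len d : Int) + 1) := by
        simp [PySem.Str.len]
      simp only [truncAuxA, modelT, ge_iff_le]
      rw [if_neg h, if_neg h', ih, hl, String.append_assoc]
      congr 3
      ring

theorem cumTotals_shift (ds : List String) : ∀ (t : Int),
    cumTotals t ds = (cumTotals 0 ds).map (t + ·) := by
  induction ds with
  | nil => intro t; simp [cumTotals]
  | cons d rest ih =>
    intro t
    simp only [cumTotals, List.map_cons, zero_add]
    congr 1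
    rw [ih, ih (PySem.Str.len d + 1), List.map_map]
    congr 1
    funext x
    simp only [Function.comp_apply]
    ring

theorem intercalate_nil_cons (a : List Char) (l : List (List Char)) :
    List.intercalate [] (a :: l) = a ++ List.intercalate [] l := by
  cases l <;> simp [List.intercalate]

theorem join_empty_cons (x : String) (xs : List String) :
    PySem.Str.join "" (x :: xs) = x ++ PySem.Str.join "" xs := by
  simp [PySem.Str.join, PySem.Chars.join, intercalate_nil_cons]

theorem alt_cons (d : String) (rest : List String) (limit : Int) :
    truncate_fields_py_alt (d :: rest) limit =
      if limit ≤ (PySem.Str.len d : Int) + 1 then ""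
      else (d ++ "\n") ++ truncate_fields_py_alt rest (limit - (PySem.Str.len d + 1)) := by
  have hfind : ∀ t : Int, (cumTotals t rest).findIdx? (fun c => limit ≤ c) =
      (cumTotals 0 rest).findIdx? (fun c => limit - t ≤ c) := by
    intro t
    rw [cumTotals_shift, List.findIdx?_map]
    congr 1
    funext x
    simp only [Function.comp_apply, decide_eq_decide]
    omega
  simp only [truncate_fields_py_alt, cumTotals, zero_add, List.findIdx?_cons, List.length_cons]
  by_cases h : limit ≤ (PySem.Str.len d : Int) + 1
  · rw [if_pos (by simpa using h), if_pos h]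
    simp [PySem.Str.join, PySem.Chars.join, List.intercalate]
  · rw [if_neg (by simpa using h), if_neg h, hfind]
    cases hfo : (cumTotals 0 rest).findIdx? (fun c => limit - (PySem.Str.len d + 1) ≤ c) with
    | none => simp [join_empty_cons]
    | some i => simp [join_empty_cons]

theorem alt_eq_model (ds : List String) : ∀ (limit : Int),
    truncate_fields_py_alt ds limit = modelT ds limit := by
  induction ds with
  | nil =>
    intro limit
    simp [truncate_fields_py_alt, cumTotals, modelT, PySem.Str.join, PySem.Chars.join,
      List.intercalate]
  | cons d rest ih =>
    intro limit
    rw [alt_cons, modelT]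
    split_ifs with h
    · rfl
    · rw [ih]

-- ===== VERDICT (by name: the statement is the Claim_ definition above) =====
theorem truncate_fields_py_spec : Claim_equal_truncate_fields_py := by
  intro dataset limit _
  unfold Spec_truncate_fields_py truncate_fields_py
  rw [truncAuxA_eq, alt_eq_model]
  simp [PySem.Str.len]
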